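-- pv_equiv track=rewrite | github.com/Nenavathnaresh/Python_DSA | Matrix/Easy/covarage-of-all-zeroes-in-a-binary-matrix.py | sum_of_coverage
-- ===== SOURCE A (Python) =====
-- def sum_of_coverage(matrix):
--     n = len(matrix)
--     m = len(matrix[0])
--     total_coverage = 0
--
--     for i in range(n):
--         for j in range(m):
--             if matrix[i][j] == 0:
--                 # Check left
--                 if j - 1 >= 0 and matrix[i][j - 1] == 1:
--                     total_coverage += 1
--                 # Check right
--                 if j + 1 < m and matrix[i][j + 1] == 1:
--                     total_coverage += 1
--                 # Check up
--                 if i - 1 >= 0 and matrix[i - 1][j] == 1: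
--                     total_coverage += 1
--                 # Check down
--                 if i + 1 < n and matrix[i + 1][j] == 1:
--                     total_coverage += 1
--
--     return total_coverage
-- ===== SOURCE B (Python) =====
-- def sum_of_coverage(matrix):
--     n = len(matrix)
--     m = len(matrix[0])
--     total = 0
--     for i in range(n):
--         for j in range(m):
--             if j + 1 < m:
--                 a = matrix[i][j]
--                 b = matrix[i][j + 1]
--                 if (a == 0 and b == 1) or (a == 1 and b == 0):
--                     total += 1
--             if i + 1 < n:
--                 a = matrix[i][j]
--                 b = matrix[i + 1][j]
--                 if (a == 0 and b == 1) or (a == 1 and b == 0):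
--                     total += 1
--     return total
-- ===== Notes on version B (the rewrite author's own statement) =====
-- stated objective: alternative
-- what changed: B counts each grid edge exactly once (one horizontal and one vertical adjacent pair per cell, testing 0/1 on both endpoints) instead of A's per-zero-cell inspection of all four neighbours, halving the pair examinations.
import Mathlib
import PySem

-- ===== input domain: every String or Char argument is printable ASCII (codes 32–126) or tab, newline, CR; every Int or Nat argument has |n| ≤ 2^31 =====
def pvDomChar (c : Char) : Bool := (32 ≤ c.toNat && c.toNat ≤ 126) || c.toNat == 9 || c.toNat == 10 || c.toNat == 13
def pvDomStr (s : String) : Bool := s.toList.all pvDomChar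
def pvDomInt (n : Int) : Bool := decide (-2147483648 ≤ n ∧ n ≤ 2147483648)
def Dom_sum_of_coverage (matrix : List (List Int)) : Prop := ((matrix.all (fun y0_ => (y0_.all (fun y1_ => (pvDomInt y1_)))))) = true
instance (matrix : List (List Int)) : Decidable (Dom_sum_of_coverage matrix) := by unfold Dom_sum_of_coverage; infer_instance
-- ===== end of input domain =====

-- B counts each grid edge once (horizontal and vertical adjacent pairs, 0-1 in either order)
-- instead of A's per-zero-cell test of all four neighbours: same value, one check per edge (objective: simpler decomposition).

-- ===== PORT A =====
-- per-cell body of A's nested loops (the four neighbour checks), kept as a named helper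
def aCell (matrix : List (List Int)) (n m total_coverage i j : Int) : Int :=
  if PySem.List.pyGetD (PySem.List.pyGetD matrix i []) j 0 = 0 then
    -- Check left
    let total_coverage := if 0 ≤ j - 1 ∧ PySem.List.pyGetD (PySem.List.pyGetD matrix i []) (j - 1) 0 = 1 then total_coverage + 1 else total_coverage
    -- Check right
    let total_coverage := if j + 1 < m ∧ PySem.List.pyGetD (PySem.List.pyGetD matrix i []) (j + 1) 0 = 1 then total_coverage + 1 else total_coverage
    -- Check up
    let total_coverage := if 0 ≤ i - 1 ∧ PySem.List.pyGetD (PySem.List.pyGetD matrix (i - 1) []) j 0 = 1 then total_coverage + 1 else total_coverage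
    -- Check down
    let total_coverage := if i + 1 < n ∧ PySem.List.pyGetD (PySem.List.pyGetD matrix (i + 1) []) j 0 = 1 then total_coverage + 1 else total_coverage
    total_coverage
  else total_coverage

def sum_of_coverage (matrix : List (List Int)) : Int :=
  let n := PySem.List.len matrix
  let m := PySem.List.len (PySem.List.pyGetD matrix 0 [])
  (PySem.List.pyRange 0 n 1).foldl (fun total_coverage i =>
    (PySem.List.pyRange 0 m 1).foldl (fun total_coverage j =>
      aCell matrix n m total_coverage i j) total_coverage) 0

-- ===== PORT B =====
-- per-cell body of B's loops: one horizontal and one vertical edge per cell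
def bCell (matrix : List (List Int)) (n m total i j : Int) : Int :=
  let total :=
    if j + 1 < m then
      let a := PySem.List.pyGetD (PySem.List.pyGetD matrix i []) j 0
      let b := PySem.List.pyGetD (PySem.List.pyGetD matrix i []) (j + 1) 0
      if (a = 0 ∧ b = 1) ∨ (a = 1 ∧ b = 0) then total + 1 else total
    else total
  let total :=
    if i + 1 < n then
      let a := PySem.List.pyGetD (PySem.List.pyGetD matrix i []) j 0
      let b := PySem.List.pyGetD (PySem.List.pyGetD matrix (i + 1) []) j 0
      if (a = 0 ∧ b = 1) ∨ (a = 1 ∧ b = 0) then total + 1 else total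
    else total
  total

def sum_of_coverage_alt (matrix : List (List Int)) : Int :=
  let n := PySem.List.len matrix
  let m := PySem.List.len (PySem.List.pyGetD matrix 0 [])
  (PySem.List.pyRange 0 n 1).foldl (fun total i =>
    (PySem.List.pyRange 0 m 1).foldl (fun total j =>
      bCell matrix n m total i j) total) 0

-- ===== PRECONDITION & SPEC =====
-- Pre_ excludes exactly the inputs where the Python A raises IndexError: the empty matrix
-- (len(matrix[0])) and matrices with a row shorter than the first row (matrix[i][j] out of range).
def Pre_sum_of_coverage (matrix : List (List Int)) : Prop :=
  matrix ≠ [] ∧ ∀ row ∈ matrix, (matrix.headD []).length ≤ row.length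
instance (matrix : List (List Int)) : Decidable (Pre_sum_of_coverage matrix) := by unfold Pre_sum_of_coverage; infer_instance
def pvWitness_sum_of_coverage : List (List Int) := [[0, 1], [1, 0]]
def Spec_sum_of_coverage (matrix : List (List Int)) (out : Int) : Prop := out = sum_of_coverage_alt matrix
instance (matrix : List (List Int)) (out : Int) : Decidable (Spec_sum_of_coverage matrix out) := by unfold Spec_sum_of_coverage; infer_instance

-- ===== CLAIM (what is proved, stated in full; the proofs are below) =====
def Claim_equal_sum_of_coverage : Prop := ∀ (matrix : List (List Int)), Dom_sum_of_coverage matrix → Pre_sum_of_coverage matrix → Spec_sum_of_coverage matrix (sum_of_coverage matrix)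

-- ===== LEMMAS AND PROOFS =====

-- 0/1 indicator of a decidable proposition
def ite1 (c : Prop) [Decidable c] : Int := if c then 1 else 0

-- the matrix read as a total function on Nat indices (out of range = 0, as the ports' pyGetD)
def gN (matrix : List (List Int)) (i j : ℕ) : Int := (matrix.getD i []).getD j 0

-- A's per-cell contribution, on Nat indices
def aT (matrix : List (List Int)) (n m i j : ℕ) : Int :=
  ite1 (gN matrix i j = 0 ∧ 1 ≤ j ∧ gN matrix i (j - 1) = 1) +
  ite1 (gN matrix i j = 0 ∧ j + 1 < m ∧ gN matrix i (j + 1) = 1) +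
  ite1 (gN matrix i j = 0 ∧ 1 ≤ i ∧ gN matrix (i - 1) j = 1) +
  ite1 (gN matrix i j = 0 ∧ i + 1 < n ∧ gN matrix (i + 1) j = 1)

-- B's per-cell contribution, on Nat indices
def bT (matrix : List (List Int)) (n m i j : ℕ) : Int :=
  ite1 (j + 1 < m ∧ ((gN matrix i j = 0 ∧ gN matrix i (j + 1) = 1) ∨ (gN matrix i j = 1 ∧ gN matrix i (j + 1) = 0))) +
  ite1 (i + 1 < n ∧ ((gN matrix i j = 0 ∧ gN matrix (i + 1) j = 1) ∨ (gN matrix i j = 1 ∧ gN matrix (i + 1) j = 0)))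

-- list-sum over List.range is the Finset.range sum
lemma sum_map_list_range (n : ℕ) (f : ℕ → Int) :
    ((List.range n).map f).sum = ∑ k ∈ Finset.range n, f k := by
  induction n with
  | zero => simp
  | succ k ih => rw [List.range_succ, Finset.sum_range_succ]; simp [ih]

-- fold of an additive body over range(0, n) is a Finset sum
lemma foldl_pyRange_sum (n : ℕ) (g : Int → Int) (init : Int) :
    (PySem.List.pyRange 0 (n : Int) 1).foldl (fun acc x => acc + g x) init
      = init + ∑ k ∈ Finset.range n, g (k : Int) := by
  rw [PySem.List.foldl_add, PySem.List.pyRange_one]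
  simp [List.map_map, Function.comp_def, sum_map_list_range]

-- shifting a "previous neighbour" sum down by one
lemma sum_shift_left (m : ℕ) (Q : ℕ → Prop) [DecidablePred Q] :
    ∑ j ∈ Finset.range m, ite1 (1 ≤ j ∧ Q (j - 1)) = ∑ j ∈ Finset.range (m - 1), ite1 (Q j) := by
  cases m with
  | zero => simp
  | succ k =>
    rw [Finset.sum_range_succ']
    simp [ite1]

-- dropping the vacuous last index of a "next neighbour" sum
lemma sum_drop_last (m : ℕ) (Q : ℕ → Prop) [DecidablePred Q] :
    ∑ j ∈ Finset.range m, ite1 (j + 1 < m ∧ Q j) = ∑ j ∈ Finset.range (m - 1), ite1 (Q j) := by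
  cases m with
  | zero => simp
  | succ k =>
    rw [Finset.sum_range_succ]
    simp only [Nat.add_sub_cancel]
    have : ∀ j ∈ Finset.range k, ite1 (j + 1 < k + 1 ∧ Q j) = ite1 (Q j) := by
      intro j hj
      have := Finset.mem_range.mp hj
      simp [ite1, this]
    rw [Finset.sum_congr rfl this]
    simp [ite1]

-- the one-dimensional core: per-zero-cell left/right checks = per-edge check, along one line
lemma oneD (h : ℕ → Int) (m : ℕ) :
    ∑ j ∈ Finset.range m,
        (ite1 (h j = 0 ∧ 1 ≤ j ∧ h (j - 1) = 1) + ite1 (h j = 0 ∧ j + 1 < m ∧ h (j + 1) = 1))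
      = ∑ j ∈ Finset.range m,
        ite1 (j + 1 < m ∧ ((h j = 0 ∧ h (j + 1) = 1) ∨ (h j = 1 ∧ h (j + 1) = 0))) := by
  rw [Finset.sum_add_distrib]
  have h1 : ∑ j ∈ Finset.range m, ite1 (h j = 0 ∧ 1 ≤ j ∧ h (j - 1) = 1)
      = ∑ j ∈ Finset.range m, ite1 (1 ≤ j ∧ (h ((j - 1) + 1) = 0 ∧ h (j - 1) = 1)) := by
    apply Finset.sum_congr rfl
    intro j _
    rcases j with _ | j' <;> simp [ite1, and_comm]
  have h2 : ∑ j ∈ Finset.range m, ite1 (h j = 0 ∧ j + 1 < m ∧ h (j + 1) = 1)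
      = ∑ j ∈ Finset.range m, ite1 (j + 1 < m ∧ (h j = 0 ∧ h (j + 1) = 1)) := by
    apply Finset.sum_congr rfl
    intro j _
    simp [ite1, and_assoc, and_comm]
  rw [h1, h2, sum_shift_left m (fun j => h (j + 1) = 0 ∧ h j = 1),
      sum_drop_last m (fun j => h j = 0 ∧ h (j + 1) = 1),
      sum_drop_last m (fun j => (h j = 0 ∧ h (j + 1) = 1) ∨ (h j = 1 ∧ h (j + 1) = 0)),
      ← Finset.sum_add_distrib]
  apply Finset.sum_congr rfl
  intro j _
  unfold ite1
  split_ifs <;> omega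

-- the grid identity: A's per-cell neighbour count equals B's per-edge count
lemma grid_identity (matrix : List (List Int)) (n m : ℕ) :
    ∑ i ∈ Finset.range n, ∑ j ∈ Finset.range m, aT matrix n m i j
      = ∑ i ∈ Finset.range n, ∑ j ∈ Finset.range m, bT matrix n m i j := by
  unfold aT bT
  simp only [Finset.sum_add_distrib]
  have Hh : (∑ i ∈ Finset.range n, ∑ j ∈ Finset.range m,
        ite1 (gN matrix i j = 0 ∧ 1 ≤ j ∧ gN matrix i (j - 1) = 1)) +
      (∑ i ∈ Finset.range n, ∑ j ∈ Finset.range m,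
        ite1 (gN matrix i j = 0 ∧ j + 1 < m ∧ gN matrix i (j + 1) = 1)) =
      ∑ i ∈ Finset.range n, ∑ j ∈ Finset.range m,
        ite1 (j + 1 < m ∧ ((gN matrix i j = 0 ∧ gN matrix i (j + 1) = 1) ∨ (gN matrix i j = 1 ∧ gN matrix i (j + 1) = 0))) := by
    rw [← Finset.sum_add_distrib]
    apply Finset.sum_congr rfl
    intro i _
    rw [← Finset.sum_add_distrib]
    exact oneD (fun j => gN matrix i j) m
  have Hv : (∑ i ∈ Finset.range n, ∑ j ∈ Finset.range m,
        ite1 (gN matrix i j = 0 ∧ 1 ≤ i ∧ gN matrix (i - 1) j = 1)) +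
      (∑ i ∈ Finset.range n, ∑ j ∈ Finset.range m,
        ite1 (gN matrix i j = 0 ∧ i + 1 < n ∧ gN matrix (i + 1) j = 1)) =
      ∑ i ∈ Finset.range n, ∑ j ∈ Finset.range m,
        ite1 (i + 1 < n ∧ ((gN matrix i j = 0 ∧ gN matrix (i + 1) j = 1) ∨ (gN matrix i j = 1 ∧ gN matrix (i + 1) j = 0))) := by
    rw [Finset.sum_comm, Finset.sum_comm (f := fun i j =>
        ite1 (gN matrix i j = 0 ∧ i + 1 < n ∧ gN matrix (i + 1) j = 1)),
      Finset.sum_comm (f := fun i j =>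
        ite1 (i + 1 < n ∧ ((gN matrix i j = 0 ∧ gN matrix (i + 1) j = 1) ∨ (gN matrix i j = 1 ∧ gN matrix (i + 1) j = 0))))]
    rw [← Finset.sum_add_distrib]
    apply Finset.sum_congr rfl
    intro j _
    rw [← Finset.sum_add_distrib]
    exact oneD (fun i => gN matrix i j) n
  linarith [Hh, Hv]

-- Int-level per-cell deltas of the two loop bodies
def aDelta (matrix : List (List Int)) (n m i j : Int) : Int :=
  ite1 (PySem.List.pyGetD (PySem.List.pyGetD matrix i []) j 0 = 0 ∧ (0 ≤ j - 1 ∧ PySem.List.pyGetD (PySem.List.pyGetD matrix i []) (j - 1) 0 = 1)) +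
  ite1 (PySem.List.pyGetD (PySem.List.pyGetD matrix i []) j 0 = 0 ∧ (j + 1 < m ∧ PySem.List.pyGetD (PySem.List.pyGetD matrix i []) (j + 1) 0 = 1)) +
  ite1 (PySem.List.pyGetD (PySem.List.pyGetD matrix i []) j 0 = 0 ∧ (0 ≤ i - 1 ∧ PySem.List.pyGetD (PySem.List.pyGetD matrix (i - 1) []) j 0 = 1)) +
  ite1 (PySem.List.pyGetD (PySem.List.pyGetD matrix i []) j 0 = 0 ∧ (i + 1 < n ∧ PySem.List.pyGetD (PySem.List.pyGetD matrix (i + 1) []) j 0 = 1))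

def bDelta (matrix : List (List Int)) (n m i j : Int) : Int :=
  ite1 (j + 1 < m ∧ ((PySem.List.pyGetD (PySem.List.pyGetD matrix i []) j 0 = 0 ∧ PySem.List.pyGetD (PySem.List.pyGetD matrix i []) (j + 1) 0 = 1) ∨ (PySem.List.pyGetD (PySem.List.pyGetD matrix i []) j 0 = 1 ∧ PySem.List.pyGetD (PySem.List.pyGetD matrix i []) (j + 1) 0 = 0))) +
  ite1 (i + 1 < n ∧ ((PySem.List.pyGetD (PySem.List.pyGetD matrix i []) j 0 = 0 ∧ PySem.List.pyGetD (PySem.List.pyGetD matrix (i + 1) []) j 0 = 1) ∨ (PySem.List.pyGetD (PySem.List.pyGetD matrix i []) j 0 = 1 ∧ PySem.List.pyGetD (PySem.List.pyGetD matrix (i + 1) []) j 0 = 0)))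

-- a guarded chain of four increments is the sum of four indicators
lemma chain4 (c0 c1 c2 c3 c4 : Prop) [Decidable c0] [Decidable c1] [Decidable c2] [Decidable c3] [Decidable c4] (acc : Int) :
    (if c0 then
      let t1 := if c1 then acc + 1 else acc
      let t2 := if c2 then t1 + 1 else t1
      let t3 := if c3 then t2 + 1 else t2
      let t4 := if c4 then t3 + 1 else t3
      t4
    else acc)
    = acc + (ite1 (c0 ∧ c1) + ite1 (c0 ∧ c2) + ite1 (c0 ∧ c3) + ite1 (c0 ∧ c4)) := by
  by_cases h0 : c0 <;> by_cases h1 : c1 <;> by_cases h2 : c2 <;> by_cases h3 : c3 <;> by_cases h4 : c4 <;>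
    simp [ite1, h0, h1, h2, h3, h4] <;> ring

-- a chain of two guarded increments is the sum of two indicators
lemma chain2 (c1 p1 c2 p2 : Prop) [Decidable c1] [Decidable p1] [Decidable c2] [Decidable p2] (acc : Int) :
    (let t1 := if c1 then (if p1 then acc + 1 else acc) else acc
     let t2 := if c2 then (if p2 then t1 + 1 else t1) else t1
     t2)
    = acc + (ite1 (c1 ∧ p1) + ite1 (c2 ∧ p2)) := by
  by_cases h1 : c1 <;> by_cases hp1 : p1 <;> by_cases h2 : c2 <;> by_cases hp2 : p2 <;>
    (simp [ite1, h1, hp1, h2, hp2]; try ring)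

lemma aCell_eq (matrix : List (List Int)) (n m acc i j : Int) :
    aCell matrix n m acc i j = acc + aDelta matrix n m i j := by
  exact chain4 _ _ _ _ _ acc

lemma bCell_eq (matrix : List (List Int)) (n m acc i j : Int) :
    bCell matrix n m acc i j = acc + bDelta matrix n m i j := by
  exact chain2 _ _ _ _ acc

-- "previous neighbour" condition on Int indices, read on Nat indices
lemma prevC (f : Int → Int) (g : ℕ → Int) (hfg : ∀ k : ℕ, f (k : Int) = g k) (j : ℕ) :
    (0 ≤ (j : Int) - 1 ∧ f ((j : Int) - 1) = 1) ↔ (1 ≤ j ∧ g (j - 1) = 1) := by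
  rcases j with _ | j'
  · norm_num
  · have hc : ((j' + 1 : ℕ) : Int) - 1 = (j' : Int) := by push_cast; ring
    rw [hc, hfg j']
    simp

-- "next neighbour" condition on Int indices, read on Nat indices
lemma nextC (f : Int → Int) (g : ℕ → Int) (hfg : ∀ k : ℕ, f (k : Int) = g k) (j m : ℕ) :
    ((j : Int) + 1 < (m : Int) ∧ f ((j : Int) + 1) = 1) ↔ (j + 1 < m ∧ g (j + 1) = 1) := by
  have hc : ((j : Int) + 1) = ((j + 1 : ℕ) : Int) := by push_cast; ring
  rw [hc, hfg]
  constructor <;> (rintro ⟨h, h2⟩; exact ⟨by exact_mod_cast h, h2⟩)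

lemma aDelta_cast (matrix : List (List Int)) (n m i j : ℕ) :
    aDelta matrix (n : Int) (m : Int) (i : Int) (j : Int) = aT matrix n m i j := by
  have hrow : ∀ k : ℕ, PySem.List.pyGetD (PySem.List.pyGetD matrix (i : Int) []) (k : Int) 0 = gN matrix i k := by
    intro k; simp [gN]
  have hcol : ∀ k : ℕ, PySem.List.pyGetD (PySem.List.pyGetD matrix (k : Int) []) (j : Int) 0 = gN matrix k j := by
    intro k; simp [gN]
  have h1 := prevC (fun t => PySem.List.pyGetD (PySem.List.pyGetD matrix (i : Int) []) t 0) (fun k => gN matrix i k) hrow j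
  have h2 := nextC (fun t => PySem.List.pyGetD (PySem.List.pyGetD matrix (i : Int) []) t 0) (fun k => gN matrix i k) hrow j m
  have h3 := prevC (fun t => PySem.List.pyGetD (PySem.List.pyGetD matrix t []) (j : Int) 0) (fun k => gN matrix k j) hcol i
  have h4 := nextC (fun t => PySem.List.pyGetD (PySem.List.pyGetD matrix t []) (j : Int) 0) (fun k => gN matrix k j) hcol i n
  unfold aDelta aT
  simp only [h1, h2, h3, h4, hrow]

lemma bDelta_cast (matrix : List (List Int)) (n m i j : ℕ) :
    bDelta matrix (n : Int) (m : Int) (i : Int) (j : Int) = bT matrix n m i j := by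
  have hcj : ((j : Int) + 1) = ((j + 1 : ℕ) : Int) := by push_cast; ring
  have hci : ((i : Int) + 1) = ((i + 1 : ℕ) : Int) := by push_cast; ring
  unfold bDelta bT gN
  simp only [hcj, hci, PySem.List.pyGetD_natCast, Nat.cast_lt]

-- A's fold equals the double Finset sum of aT
lemma portA_eq_sum (matrix : List (List Int)) :
    sum_of_coverage matrix
      = ∑ i ∈ Finset.range matrix.length,
          ∑ j ∈ Finset.range (matrix.getD 0 []).length,
            aT matrix matrix.length (matrix.getD 0 []).length i j := by
  unfold sum_of_coverage
  simp only [PySem.List.len_eq, PySem.List.pyGetD_zero, aCell_eq, foldl_pyRange_sum, zero_add]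
  refine Finset.sum_congr rfl fun i _ => Finset.sum_congr rfl fun j _ => ?_
  exact aDelta_cast matrix matrix.length (matrix.getD 0 []).length i j

-- B's fold equals the double Finset sum of bT
lemma portB_eq_sum (matrix : List (List Int)) :
    sum_of_coverage_alt matrix
      = ∑ i ∈ Finset.range matrix.length,
          ∑ j ∈ Finset.range (matrix.getD 0 []).length,
            bT matrix matrix.length (matrix.getD 0 []).length i j := by
  unfold sum_of_coverage_alt
  simp only [PySem.List.len_eq, PySem.List.pyGetD_zero, bCell_eq, foldl_pyRange_sum, zero_add]
  refine Finset.sum_congr rfl fun i _ => Finset.sum_congr rfl fun j _ => ?_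
  exact bDelta_cast matrix matrix.length (matrix.getD 0 []).length i j

-- ===== VERDICT (by name: the statement is the Claim_ definition above) =====
theorem sum_of_coverage_spec : Claim_equal_sum_of_coverage := by
  intro matrix _ _
  unfold Spec_sum_of_coverage
  rw [portA_eq_sum, portB_eq_sum, grid_identity]
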